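-- pv_equiv track=rewrite | github.com/ayssag/vigenere-cipher-unb | src/modules/attack.py | split_nth_letter
-- ===== SOURCE A (Python) =====
-- def split_nth_letter(text, n):
--     split_strings = []
--     for offset in range(n):
--         current_string = ""
--         for i in range(offset, len(text), n):
--             current_string += text[i]
--
--         split_strings.append(current_string)
--
--     return split_strings
-- ===== SOURCE B (Python) =====
-- def split_nth_letter(text, n):
--     if n <= 0:
--         return []
--     buckets = [[] for _ in range(n)]
--     for i, ch in enumerate(text):
--         buckets[i % n].append(ch)
--     return ["".join(b) for b in buckets]
-- ===== Notes on version B (the rewrite author's own statement) =====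
-- stated objective: alternative
-- what changed: B makes one row-major pass over the text, distributing each character to bucket i % n maintained all at once, instead of A's n separate strided passes over the text.
import Mathlib
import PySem

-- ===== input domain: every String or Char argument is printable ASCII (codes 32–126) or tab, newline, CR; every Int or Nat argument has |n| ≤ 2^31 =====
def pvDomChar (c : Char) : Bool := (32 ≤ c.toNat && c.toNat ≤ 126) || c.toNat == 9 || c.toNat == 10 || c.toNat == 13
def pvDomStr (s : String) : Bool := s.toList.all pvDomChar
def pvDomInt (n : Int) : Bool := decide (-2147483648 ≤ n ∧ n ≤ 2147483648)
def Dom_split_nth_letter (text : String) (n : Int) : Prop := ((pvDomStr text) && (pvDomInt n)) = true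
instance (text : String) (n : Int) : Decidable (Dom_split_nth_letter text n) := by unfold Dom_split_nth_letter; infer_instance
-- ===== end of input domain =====

-- B builds all n buckets in ONE row-major pass over the text (each character goes to
-- bucket i % n) instead of A's n separate strided passes: alternative decomposition,
-- same asymptotic cost.

-- ===== PORT A =====
-- Python str accumulators are ported as List Char, wrapped with String.ofList when
-- appended to the result list (Lean's own String append is kernel-opaque).
def split_nth_letter (text : String) (n : Int) : List String :=
  (PySem.List.pyRange 0 n 1).foldl
    (fun split_strings offset =>
      split_strings ++
        [String.ofList
          ((PySem.List.pyRange offset (PySem.Str.len text) n).foldl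
            (fun current_string i =>
              match PySem.Str.pyGet? text i with
              | some c => current_string ++ [c]
              | none => current_string)   -- unreachable: every i lies in [0, len text)
            [])])
    []

-- ===== PORT B =====
def split_nth_letter_alt (text : String) (n : Int) : List String :=
  if n ≤ 0 then []
  else
    -- buckets = [[] for _ in range(n)], then one pass distributing text[i] to buckets[i % n]
    (((PySem.List.enumerate text.toList).foldl
        (fun buckets p =>
          buckets.modify (PySem.Int.mod p.1 n).toNat (fun b => b ++ [p.2]))
        ((PySem.List.pyRange 0 n 1).map (fun _ => []))).map
      (fun b => String.ofList b))

-- ===== PRECONDITION & SPEC =====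
def Spec_split_nth_letter (text : String) (n : Int) (out : List String) : Prop := out = split_nth_letter_alt text n
instance (text : String) (n : Int) (out : List String) : Decidable (Spec_split_nth_letter text n out) := by unfold Spec_split_nth_letter; infer_instance

-- ===== CLAIM (what is proved, stated in full; the proofs are below) =====
def Claim_equal_split_nth_letter : Prop := ∀ (text : String) (n : Int), Dom_split_nth_letter text n → Spec_split_nth_letter text n (split_nth_letter text n)

-- ===== LEMMAS AND PROOFS =====

-- chars of L at (absolute) positions i, i+1, … whose position is ≡ k (mod m)
def colFrom (L : List Char) (i m k : Nat) : List Char :=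
  match L with
  | [] => []
  | c :: t => (if i % m = k then [c] else []) ++ colFrom t (i + 1) m k

theorem colFrom_snoc (L : List Char) (c : Char) (i m k : Nat) :
    colFrom (L ++ [c]) i m k =
      colFrom L i m k ++ (if (i + L.length) % m = k then [c] else []) := by
  induction L generalizing i with
  | nil => simp [colFrom]
  | cons x t ih =>
    simp only [List.cons_append, colFrom, ih (i + 1), List.length_cons, List.append_assoc]
    have h : i + 1 + t.length = i + (t.length + 1) := by omega
    rw [h]
    rfl

-- 'the next index len is in the strided range starting at k' ↔ 'len % m = k'
theorem cond_iff (len m k : Nat) (hk : k < m) :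
    ((k : Int) ≤ (len : Int) ∧ (m : Int) ∣ (len : Int) - (k : Int)) ↔ len % m = k := by
  constructor
  · rintro ⟨hle, t, ht⟩
    have ht0 : 0 ≤ t := by nlinarith [Int.natCast_nonneg len, Int.natCast_nonneg k]
    have h2 : (len : Int) = (k : Int) + (m : Int) * ((t.toNat : Nat) : Int) := by
      have : ((t.toNat : Nat) : Int) = t := by omega
      rw [this]; linarith
    have hnat : len = k + m * t.toNat := by exact_mod_cast h2
    rw [hnat, Nat.add_mul_mod_self_left, Nat.mod_eq_of_lt hk]
  · intro h
    have hle : k ≤ len := h ▸ Nat.mod_le len m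
    have hnat : m * (len / m) + k = len := by rw [← h]; exact Nat.div_add_mod len m
    refine ⟨by exact_mod_cast hle, ((len / m : Nat) : Int), ?_⟩
    have h2 := congrArg (Nat.cast : Nat → Int) hnat
    rw [Nat.cast_add, Nat.cast_mul] at h2
    linarith

-- pyRange with a positive step, one more on the right
theorem pyRange_step_succ_right (a b s : Int) (hs : 0 < s) :
    PySem.List.pyRange a (b + 1) s =
      PySem.List.pyRange a b s ++ (if a ≤ b ∧ s ∣ (b - a) then [b] else []) := by
  rw [PySem.List.pyRange_of_pos a (b + 1) hs, PySem.List.pyRange_of_pos a b hs]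
  by_cases hab : a ≤ b
  · have h1 : a < b + 1 := by omega
    obtain ⟨q, r, hqr, hr0, hrs⟩ : ∃ q r : Int, b - a = q * s + r ∧ 0 ≤ r ∧ r < s :=
      ⟨(b - a) / s, (b - a) % s, by rw [Int.ediv_mul_add_emod (b - a) s], Int.emod_nonneg _ (by omega), Int.emod_lt_of_pos _ hs⟩
    have hq0 : 0 ≤ q := by nlinarith
    have hcnt2 : (if a < b + 1 then ((b + 1 - a + s - 1) / s).toNat else 0) = q.toNat + 1 := by
      rw [if_pos h1]
      have he : b + 1 - a + s - 1 = r + 1 * s + q * s := by omega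
      rw [he, Int.add_mul_ediv_right _ _ (by omega : s ≠ 0),
        Int.add_mul_ediv_right _ _ (by omega : s ≠ 0),
        Int.ediv_eq_zero_of_lt hr0 hrs]
      omega
    by_cases hd : s ∣ (b - a)
    · have hr : r = 0 := by
        obtain ⟨t, ht⟩ := hd
        have h : r = (t - q) * s := by nlinarith
        rcases lt_trichotomy (t - q) 0 with hlt | heq | hgt
        · nlinarith
        · simp [heq] at h; omega
        · nlinarith
      have hcnt1 : (if a < b then ((b - a + s - 1) / s).toNat else 0) = q.toNat := by
        by_cases hab2 : a < b
        · rw [if_pos hab2]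
          have he : b - a + s - 1 = (s - 1) + q * s := by omega
          rw [he, Int.add_mul_ediv_right _ _ (by omega : s ≠ 0),
            Int.ediv_eq_zero_of_lt (by omega) (by omega)]
          omega
        · have hqz : q = 0 := by nlinarith
          simp [hab2, hqz]
      rw [hcnt2, hcnt1, if_pos (show a ≤ b ∧ s ∣ (b - a) from ⟨hab, hd⟩), List.range_succ]
      simp only [List.map_append, List.map_cons, List.map_nil, List.append_cancel_left_eq]
      have hlast : a + s * (q.toNat : Int) = b := by
        have hq : (q.toNat : Int) = q := by omega
        rw [hq]; nlinarith
      have hm : max q 0 = q := by omega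
      simp only [Int.toNat_eq_max, hm] at hlast ⊢
      simp [hlast]
    · have hr : r ≠ 0 := fun h0 => hd ⟨q, by rw [hqr, h0]; ring⟩
      have hab2 : a < b := by
        rcases eq_or_lt_of_le hab with h | h
        · exfalso; apply hd; rw [← h]; simp
        · exact h
      have hcnt1 : (if a < b then ((b - a + s - 1) / s).toNat else 0) = q.toNat + 1 := by
        rw [if_pos hab2]
        have he : b - a + s - 1 = (r - 1) + 1 * s + q * s := by omega
        rw [he, Int.add_mul_ediv_right _ _ (by omega : s ≠ 0),
          Int.add_mul_ediv_right _ _ (by omega : s ≠ 0),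
          Int.ediv_eq_zero_of_lt (by omega) (by omega)]
        omega
      rw [hcnt2, hcnt1, if_neg (fun h => hd h.2)]
      simp
  · rw [if_neg (show ¬ (a ≤ b ∧ s ∣ (b - a)) from fun h => hab h.1),
      if_neg (show ¬ a < b + 1 by omega), if_neg (show ¬ a < b by omega)]
    simp

-- A's strided pass for offset k collects exactly the column-k characters
theorem a_col (m k : Nat) (hm : 0 < m) (hk : k < m) (L : List Char) :
    (PySem.List.pyRange (k : Int) (L.length : Int) (m : Int)).map
        (fun i => L.getD i.toNat ' ') = colFrom L 0 m k := by
  induction L using List.reverseRecOn with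
  | nil =>
    have h0 : PySem.List.pyRange (k : Int) ((([] : List Char).length : Nat) : Int) (m : Int) = [] := by
      rw [PySem.List.pyRange_of_pos _ _ (by exact_mod_cast hm : (0 : Int) < (m : Int))]
      simp
    rw [h0]
    rfl
  | append_singleton L c ih =>
    have hcast : (((L ++ [c]).length : Nat) : Int) = (L.length : Int) + 1 := by
      push_cast [List.length_append]
      simp
    rw [hcast, pyRange_step_succ_right _ _ _ (by exact_mod_cast hm), List.map_append]
    rw [colFrom_snoc]
    congr 1
    · rw [← ih]
      apply List.map_congr_left
      intro i hi
      rw [PySem.List.mem_pyRange_iff_of_pos (by exact_mod_cast hm)] at hi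
      obtain ⟨h1, h2, _⟩ := hi
      have h0 : 0 ≤ i := le_trans (Int.natCast_nonneg k) h1
      have hlt : i.toNat < L.length := by omega
      exact List.getD_append _ _ _ _ hlt
    · have hiff := cond_iff L.length m k hk
      by_cases hc : L.length % m = k
      · rw [if_pos (hiff.mpr hc), if_pos (by simpa using hc)]
        simp
      · rw [if_neg (fun h => hc (hiff.mp h)), if_neg (by simpa using hc)]
        simp

-- B's single distributing pass: what every bucket holds, for any start index / buckets
theorem b_inv (m : Nat) (L : List Char) :
    ∀ (i : Nat) (bs : List (List Char)), bs.length = m →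
      (PySem.List.enumerate L (i : Int)).foldl
          (fun bs p => bs.modify (PySem.Int.mod p.1 (m : Int)).toNat (fun b => b ++ [p.2])) bs
        = (List.range m).map (fun k => bs.getD k [] ++ colFrom L i m k) := by
  induction L with
  | nil =>
    intro i bs hbs
    have he : PySem.List.enumerate ([] : List Char) (i : Int) = [] := by
      simp [PySem.List.enumerate]
    rw [he]
    simp only [List.foldl_nil, colFrom, List.append_nil]
    apply List.ext_getElem
    · simp [hbs]
    · intro j h1 h2
      simp only [List.getElem_map, List.getElem_range]
      rw [List.getD_eq_getElem bs [] (by omega)]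
  | cons c t ih =>
    intro i bs hbs
    have hstep : PySem.List.enumerate (c :: t) (i : Int)
        = ((i : Int), c) :: PySem.List.enumerate t ((i : Int) + 1) := by
      simp [PySem.List.enumerate]
    rw [hstep, List.foldl_cons]
    have hmod : (PySem.Int.mod ((i : Int)) ((m : Int))).toNat = i % m := by
      rw [PySem.Int.mod_natCast]; exact Int.toNat_natCast _
    have hcast : ((i : Int) + 1) = ((i + 1 : Nat) : Int) := by push_cast; ring
    rw [hmod, hcast, ih (i + 1) _ (by simp [hbs])]
    apply List.map_congr_left
    intro k hk
    rw [List.mem_range] at hk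
    have hgd : (bs.modify (i % m) (fun b => b ++ [c])).getD k [] =
        (if i % m = k then bs.getD k [] ++ [c] else bs.getD k []) := by
      rw [List.getD_eq_getElem _ [] (by simp [hbs]; omega),
        List.getD_eq_getElem bs [] (by omega)]
      rw [List.getElem_modify]
    rw [hgd]
    simp only [colFrom]
    by_cases hc : i % m = k
    · simp [hc]
    · simp [hc]

-- A's whole output in column form
theorem a_char (m : Nat) (hm : 0 < m) (text : String) :
    split_nth_letter text (m : Int)
      = (List.range m).map (fun k => String.ofList (colFrom text.toList 0 m k)) := by
  unfold split_nth_letter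
  rw [PySem.List.pyRange_zero_natCast m,
    PySem.List.foldl_append_singleton_eq_map
      (fun offset => String.ofList
        ((PySem.List.pyRange offset (PySem.Str.len text) (m : Int)).foldl
          (fun current_string i =>
            match PySem.Str.pyGet? text i with
            | some c => current_string ++ [c]
            | none => current_string) [])),
    List.nil_append, List.map_map]
  apply List.map_congr_left
  intro k hk
  rw [List.mem_range] at hk
  simp only [Function.comp]
  congr 1
  have hlen : PySem.Str.len text = ((text.toList.length : Nat) : Int) := by
    simp [PySem.Str.len_eq]
  rw [hlen]
  rw [PySem.List.foldl_congr_mem _ _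
    (fun current_string i => current_string ++ [text.toList.getD i.toNat ' ']) _
    (by
      intro acc i hi
      rw [PySem.List.mem_pyRange_iff_of_pos (by exact_mod_cast hm : (0 : Int) < (m : Int))] at hi
      obtain ⟨h1, h2, _⟩ := hi
      have h0 : 0 ≤ i := le_trans (Int.natCast_nonneg k) h1
      have hi' : i = ((i.toNat : Nat) : Int) := by omega
      have hlt : i.toNat < text.toList.length := by omega
      rw [hi', PySem.Str.pyGet?_natCast, List.getElem?_eq_getElem hlt]
      simp only [List.getD, Int.toNat_natCast]
      simp [List.getElem?_eq_getElem hlt])]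
  rw [PySem.List.foldl_append_singleton_eq_map, List.nil_append]
  exact a_col m k hm hk text.toList

-- B's whole output in column form
theorem b_char (m : Nat) (hm : 0 < m) (text : String) :
    split_nth_letter_alt text (m : Int)
      = (List.range m).map (fun k => String.ofList (colFrom text.toList 0 m k)) := by
  unfold split_nth_letter_alt
  rw [if_neg (show ¬ ((m : Int) ≤ 0) by omega)]
  have hlen : ((PySem.List.pyRange 0 (m : Int) 1).map
      (fun _ => ([] : List Char))).length = m := by
    rw [PySem.List.pyRange_zero_natCast m]
    simp
  have hinv := b_inv m text.toList 0 _ hlen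
  simp only [Nat.cast_zero] at hinv
  rw [hinv, List.map_map]
  apply List.map_congr_left
  intro k hk
  rw [List.mem_range] at hk
  have hgd : ((PySem.List.pyRange 0 (m : Int) 1).map
      (fun _ => ([] : List Char))).getD k [] = [] := by
    rw [List.getD_eq_getElem _ [] (by rw [hlen]; omega)]
    simp
  simp only [Function.comp, hgd, List.nil_append]

-- ===== VERDICT (by name: the statement is the Claim_ definition above) =====
theorem split_nth_letter_spec : Claim_equal_split_nth_letter := by
  intro text n _
  unfold Spec_split_nth_letter
  by_cases hn : n ≤ 0
  · have hB : split_nth_letter_alt text n = [] := by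
      unfold split_nth_letter_alt; rw [if_pos hn]
    have hr : PySem.List.pyRange 0 n 1 = [] := by
      rw [PySem.List.pyRange_of_pos _ _ (by norm_num : (0 : Int) < 1)]
      simp [show ¬ (0 : Int) < n by omega]
    have hA : split_nth_letter text n = [] := by
      unfold split_nth_letter; rw [hr]; rfl
    rw [hA, hB]
  · have hm : 0 < n.toNat := by omega
    have hnn : n = ((n.toNat : Nat) : Int) := by omega
    rw [hnn, a_char n.toNat hm text, b_char n.toNat hm text]
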